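-- pv_equiv track=rewrite | github.com/jgontrum/histogramPostprocessor | IntervalFinder.py | getIntervalByTimestamp
-- ===== SOURCE A (Python) =====
-- def getIntervalByTimestamp(data, begin, end):
--     beginIndex = -1
--     endIndex = -1
--
--     for i in range(len(data)):
--         timestamp = data[i][0]
--
--         # still looking for the start index
--         if beginIndex < 0:
--             if timestamp >= begin:
--                 beginIndex = i
--         # start index found, now searching the end index
--         else:
--             if timestamp >= end:
--                 endIndex = i
--                 return (beginIndex, endIndex)
--
--     # No end index found: Set it to last index
--     endIndex = len(data) - 1
--     return (beginIndex, endIndex)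
-- ===== SOURCE B (Python) =====
-- def getIntervalByTimestamp(data, begin, end):
--     # Single backward pass: for each suffix, maintain (resB, eNext) where
--     # eNext = first index in the suffix with ts >= end, and resB = (b, e) for
--     # the first b in the suffix with ts >= begin, paired with the first
--     # end-match strictly after b.  Order does not matter for "first match".
--     resB = None
--     eNext = None
--     for i in range(len(data) - 1, -1, -1):
--         ts = data[i][0]
--         if ts >= begin:
--             resB = (i, eNext)
--         if ts >= end:
--             eNext = i
--     if resB is None:
--         return (-1, len(data) - 1)
--     b, e = resB
--     return (b, e if e is not None else len(data) - 1)
-- ===== Notes on version B (the rewrite author's own statement) =====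
-- stated objective: alternative
-- what changed: Replaced A's forward stateful scan with early return by a single backward (right-to-left) pass that maintains, for the current suffix, the first end-match index and the first begin-match paired with the first end-match strictly after it, so the answer is assembled back-to-front with no early exit.
-- outside the precondition, e.g. on getIntervalByTimestamp([(1,), (5,), ()], 0, 2): A returns (0, 1), B raises IndexError
import Mathlib
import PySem

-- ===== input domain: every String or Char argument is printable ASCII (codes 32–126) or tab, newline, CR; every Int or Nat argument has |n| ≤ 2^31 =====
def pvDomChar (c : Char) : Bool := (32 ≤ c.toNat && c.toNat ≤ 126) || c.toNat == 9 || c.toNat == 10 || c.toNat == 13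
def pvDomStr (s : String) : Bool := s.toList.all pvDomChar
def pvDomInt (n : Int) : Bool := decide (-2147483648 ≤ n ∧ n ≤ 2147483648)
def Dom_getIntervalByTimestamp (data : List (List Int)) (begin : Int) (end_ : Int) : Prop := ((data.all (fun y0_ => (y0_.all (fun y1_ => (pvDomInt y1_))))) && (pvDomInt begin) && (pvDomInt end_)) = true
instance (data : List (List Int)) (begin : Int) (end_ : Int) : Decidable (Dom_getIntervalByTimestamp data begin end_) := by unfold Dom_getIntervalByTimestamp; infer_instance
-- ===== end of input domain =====

-- B replaces A's forward scan with early return by one backward pass over the data (alternative decomposition; same O(n) cost). Pre_ excludes inputs with an empty row (A raises there or returns before reaching it; B always raises there).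


-- row[0] for a row known (by Pre_) to be nonempty; PySem.List.pyGet? is exact Python indexing, the getD is never hit inside Pre_
def pvRow0 (row : List Int) : Int := (PySem.List.pyGet? row 0).getD 0

-- ===== PORT A =====
-- A's loop: index i, state beginIndex; early return when the end timestamp is found
def pvLoopA (begin end_ n : Int) : List (List Int) → Int → Int → Int × Int
  | [], _, beginIndex => (beginIndex, n - 1)
  | row :: rest, i, beginIndex =>
    let timestamp := pvRow0 row
    if beginIndex < 0 then
      if timestamp ≥ begin then pvLoopA begin end_ n rest (i + 1) i
      else pvLoopA begin end_ n rest (i + 1) beginIndex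
    else
      if timestamp ≥ end_ then (beginIndex, i)
      else pvLoopA begin end_ n rest (i + 1) beginIndex

def getIntervalByTimestamp (data : List (List Int)) (begin : Int) (end_ : Int) : Int × Int :=
  pvLoopA begin end_ (data.length : Int) data 0 (-1)

-- ===== PORT B =====
-- B's backward pass: the state for the suffix starting at index i is
-- (resB, eNext): eNext = first index in the suffix with ts ≥ end_,
-- resB = some (b, e?) for the first b in the suffix with ts ≥ begin, e? the first end-match after b.
-- Structural recursion rows→state computes exactly Source B's loop from i = n-1 down to 0.
def pvLoopB (begin end_ : Int) : List (List Int) → Int → Option (Int × Option Int) × Option Int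
  | [], _ => (none, none)
  | row :: rest, i =>
    let st := pvLoopB begin end_ rest (i + 1)
    let ts := pvRow0 row
    let resB := if ts ≥ begin then some (i, st.2) else st.1
    let eNext := if ts ≥ end_ then some i else st.2
    (resB, eNext)

def getIntervalByTimestamp_alt (data : List (List Int)) (begin : Int) (end_ : Int) : Int × Int :=
  let n : Int := data.length
  match (pvLoopB begin end_ data 0).1 with
  | none => (-1, n - 1)
  | some (b, e?) => (b, e?.getD (n - 1))

-- ===== PRECONDITION & SPEC =====
-- Pre_ excludes inputs containing an empty row: Python A raises IndexError at data[i][0] when its scan reaches such a row, and B's backward pass always raises there; the exclusion is conservative — A may return early, before the empty row (see cites).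
def Pre_getIntervalByTimestamp (data : List (List Int)) (begin : Int) (end_ : Int) : Prop :=
  ∀ row ∈ data, row ≠ []
instance (data : List (List Int)) (begin : Int) (end_ : Int) : Decidable (Pre_getIntervalByTimestamp data begin end_) := by unfold Pre_getIntervalByTimestamp; infer_instance

def pvWitness_getIntervalByTimestamp : List (List Int) × Int × Int := ([[1], [2], [3]], 1, 3)

def Spec_getIntervalByTimestamp (data : List (List Int)) (begin : Int) (end_ : Int) (out : Int × Int) : Prop := out = getIntervalByTimestamp_alt data begin end_
instance (data : List (List Int)) (begin : Int) (end_ : Int) (out : Int × Int) : Decidable (Spec_getIntervalByTimestamp data begin end_ out) := by unfold Spec_getIntervalByTimestamp; infer_instance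

-- ===== CLAIM (what is proved, stated in full; the proofs are below) =====
def Claim_equal_getIntervalByTimestamp : Prop := ∀ (data : List (List Int)) (begin : Int) (end_ : Int), Dom_getIntervalByTimestamp data begin end_ → Pre_getIntervalByTimestamp data begin end_ → Spec_getIntervalByTimestamp data begin end_ (getIntervalByTimestamp data begin end_)

-- ===== LEMMAS AND PROOFS =====

-- once beginIndex = b ≥ 0, A's loop is a first-match search for end_ from the current position
theorem pvLoopA_endPhase (begin end_ n : Int) :
    ∀ (rows : List (List Int)) (i b : Int), 0 ≤ b →
      pvLoopA begin end_ n rows i b =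
        match List.findIdx? (fun row => decide (pvRow0 row ≥ end_)) rows with
        | none => (b, n - 1)
        | some k => (b, i + (k : Int)) := by
  intro rows
  induction rows with
  | nil => intro i b _; simp [pvLoopA]
  | cons row rest ih =>
    intro i b hb
    rw [pvLoopA]
    have hnb : ¬ b < 0 := by omega
    by_cases h : pvRow0 row ≥ end_
    · simp [hnb, h, List.findIdx?_cons]
    · simp only [hnb, if_false, h, List.findIdx?_cons, decide_eq_true_eq]
      rw [ih (i + 1) b hb]
      cases hk : List.findIdx? (fun row => decide (pvRow0 row ≥ end_)) rest with
      | none => simp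
      | some k => simp <;> omega

-- while beginIndex = -1, A's loop equals the first-match characterisation
theorem pvLoopA_beginPhase (begin end_ n : Int) :
    ∀ (rows : List (List Int)) (i : Int), 0 ≤ i →
      pvLoopA begin end_ n rows i (-1) =
        match List.findIdx? (fun row => decide (pvRow0 row ≥ begin)) rows with
        | none => (-1, n - 1)
        | some j =>
          match List.findIdx? (fun row => decide (pvRow0 row ≥ end_)) (rows.drop (j + 1)) with
          | none => (i + (j : Int), n - 1)
          | some k => (i + (j : Int), i + (j : Int) + 1 + (k : Int)) := by
  intro rows
  induction rows with
  | nil => intro i _; simp [pvLoopA]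
  | cons row rest ih =>
    intro i hi
    by_cases h : pvRow0 row ≥ begin
    · have e1 : pvLoopA begin end_ n (row :: rest) i (-1) =
          pvLoopA begin end_ n rest (i + 1) i := by
        rw [pvLoopA]; simp [h]
      rw [e1, pvLoopA_endPhase begin end_ n rest (i + 1) i hi]
      simp only [List.findIdx?_cons, h, decide_true, if_true]
      cases hk : List.findIdx? (fun row => decide (pvRow0 row ≥ end_)) rest with
      | none => simp [hk]
      | some k => simp [hk]
    · have e1 : pvLoopA begin end_ n (row :: rest) i (-1) =
          pvLoopA begin end_ n rest (i + 1) (-1) := by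
        rw [pvLoopA]; simp [h]
      rw [e1, ih (i + 1) (by omega)]
      simp only [List.findIdx?_cons, decide_eq_true_eq, if_neg h]
      cases hj : List.findIdx? (fun row => decide (pvRow0 row ≥ begin)) rest with
      | none => simp
      | some j =>
        simp only [Option.map_some]
        have hdrop : (row :: rest).drop ((j : Nat) + 1 + 1) = rest.drop ((j : Nat) + 1) := by
          simp [List.drop]
        cases hk : List.findIdx? (fun row => decide (pvRow0 row ≥ end_)) (rest.drop ((j : Nat) + 1)) with
        | none => simp [hdrop, hk]; omega
        | some k => simp [hdrop, hk]; omega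

-- B's backward pass computes the same first-match data
theorem pvLoopB_eq (begin end_ : Int) :
    ∀ (rows : List (List Int)) (i : Int),
      pvLoopB begin end_ rows i =
        ((List.findIdx? (fun row => decide (pvRow0 row ≥ begin)) rows).map
           (fun (j : Nat) => ((i + (j : Int)),
             (List.findIdx? (fun row => decide (pvRow0 row ≥ end_)) (rows.drop (j + 1))).map
               (fun (k : Nat) => i + (j : Int) + 1 + (k : Int)))),
         (List.findIdx? (fun row => decide (pvRow0 row ≥ end_)) rows).map
           (fun (k : Nat) => i + (k : Int))) := by
  intro rows
  induction rows with
  | nil => intro i; simp [pvLoopB]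
  | cons row rest ih =>
    intro i
    rw [pvLoopB, ih (i + 1)]
    by_cases hb : pvRow0 row ≥ begin
    · by_cases he : pvRow0 row ≥ end_ <;>
        [skip; skip] <;>
      · simp only [hb, he, List.findIdx?_cons, decide_true, decide_false, if_true, if_false,
          decide_eq_true_eq, Option.map_some, ge_iff_le, List.drop_succ_cons, List.drop_zero]
        refine Prod.ext ?_ ?_ <;>
          cases hk : List.findIdx? (fun row => decide (pvRow0 row ≥ end_)) rest <;>
            simp [hk, he] <;> omega
    · by_cases he : pvRow0 row ≥ end_ <;>
      · simp only [hb, he, List.findIdx?_cons, decide_true, decide_false, if_true, if_false,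
          decide_eq_true_eq, Option.map_some, ge_iff_le, if_neg hb]
        refine Prod.ext ?_ ?_
        · cases hj : List.findIdx? (fun row => decide (pvRow0 row ≥ begin)) rest with
          | none => simp [hj]
          | some j =>
            have hdrop : (row :: rest).drop (j + 1 + 1) = rest.drop (j + 1) := by
              simp [List.drop]
            cases hk2 : List.findIdx? (fun row => decide (pvRow0 row ≥ end_)) (rest.drop (j + 1)) <;>
              simp [hj, hdrop, hk2] <;> omega
        · cases hk : List.findIdx? (fun row => decide (pvRow0 row ≥ end_)) rest <;>
            simp [hk, he] <;> omega

-- ===== VERDICT (by name: the statement is the Claim_ definition above) =====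
theorem getIntervalByTimestamp_spec : Claim_equal_getIntervalByTimestamp := by
  intro data begin end_ _ _
  unfold Spec_getIntervalByTimestamp getIntervalByTimestamp getIntervalByTimestamp_alt
  rw [pvLoopA_beginPhase begin end_ (data.length : Int) data 0 le_rfl,
      pvLoopB_eq begin end_ data 0]
  cases hj : List.findIdx? (fun row => decide (pvRow0 row ≥ begin)) data with
  | none => rfl
  | some j =>
    cases hk : List.findIdx? (fun row => decide (pvRow0 row ≥ end_)) (data.drop (j + 1)) with
    | none => simp [hk]
    | some k => simp [hk]
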